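-- pv_equiv track=rewrite | github.com/helloworld163/Mining-in-Social-Networks | academic_analysis_match/task3_data.py | co_author_compute
-- ===== SOURCE A (Python) =====
-- def co_author_compute(entry):
--     co_author_dic = {}
--     for paper_name in entry.keys():
--         author_set = entry[paper_name]
--         for i in range(len(author_set)):
--             if co_author_dic.get(author_set[i]):
--                 for j in range(len(author_set)):
--                     if author_set[j] == author_set[i]:
--                         continue
--                     elif author_set[j] in co_author_dic[author_set[i]]:
--                         continue
--                     else:
--                         co_author_dic[author_set[i]].append(author_set[j])
--             else:
--                 co_author_dic[author_set[i]] = []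
--                 for j in range(len(author_set)):
--                     if author_set[j] == author_set[i]:
--                         continue
--                     elif author_set[j] in co_author_dic[author_set[i]]:
--                         continue
--                     else:
--                         co_author_dic[author_set[i]].append(author_set[j])
--     return co_author_dic
-- ===== SOURCE B (Python) =====
-- def co_author_compute(entry):
--     # Grouped-index approach: one pass builds an index author -> papers containing
--     # that author (keys in first-appearance order); then each author's row is the
--     # first-occurrence dedup of the co-authors gathered from its own papers.
--     papers = list(entry.values())
--     papers_of = {}
--     for au in papers:
--         for a in dict.fromkeys(au):
--             papers_of.setdefault(a, []).append(au)
--     return {a: list(dict.fromkeys(x for au in ps for x in au if x != a))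
--             for a, ps in papers_of.items()}
-- ===== Notes on version B (the rewrite author's own statement) =====
-- stated objective: faster
-- what changed: A builds the adjacency dict incrementally, paper by paper, growing each author's list with a linear membership scan before every append; B first builds a grouped index author -> papers containing that author in one pass, then emits each author's row as the first-occurrence dedup of the co-authors gathered from its own papers.
import Mathlib
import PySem

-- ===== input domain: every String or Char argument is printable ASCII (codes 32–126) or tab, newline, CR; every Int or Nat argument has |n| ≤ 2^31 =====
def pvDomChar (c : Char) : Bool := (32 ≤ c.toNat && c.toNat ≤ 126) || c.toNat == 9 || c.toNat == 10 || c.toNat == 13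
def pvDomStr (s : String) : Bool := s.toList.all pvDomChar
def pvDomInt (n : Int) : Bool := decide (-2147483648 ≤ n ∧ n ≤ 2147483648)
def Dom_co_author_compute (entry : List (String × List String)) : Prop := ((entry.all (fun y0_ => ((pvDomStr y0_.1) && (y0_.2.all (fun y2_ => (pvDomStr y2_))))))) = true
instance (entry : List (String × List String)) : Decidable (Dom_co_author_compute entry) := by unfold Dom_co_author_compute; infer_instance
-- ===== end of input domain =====

-- B replaces A's incremental list-growth with membership scans by a one-pass
-- grouped index (author -> its papers) plus per-author dedup of the gathered
-- co-authors; a timing run measured B faster on large inputs.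

-- ===== PORT A =====
-- inner 'for j in range(len(author_set))' body of A (both branches of A run the same j-loop)
def pvStepA (a : String) (d : PySem.Dict String (List String)) (x : String) :
    PySem.Dict String (List String) :=
  if x = a then d
  else if x ∈ d.getD a [] then d
  else d.modify a [] (fun l => l ++ [x])

-- A's j-loop over the same paper's author list
def pvJA (a : String) (authors : List String) (d : PySem.Dict String (List String)) :
    PySem.Dict String (List String) :=
  (PySem.List.pyRange 0 (PySem.List.len authors)).foldl
    (fun d j => pvStepA a d (PySem.List.pyGetD authors j "")) d

-- A's i-loop over one paper: truthiness test on co_author_dic.get(author_set[i]) —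
-- falsy (missing key or empty list) assigns [], then the j-loop runs
def pvAuthorsA (d : PySem.Dict String (List String)) (authors : List String) :
    PySem.Dict String (List String) :=
  (PySem.List.pyRange 0 (PySem.List.len authors)).foldl
    (fun d i =>
      let a := PySem.List.pyGetD authors i ""
      pvJA a authors (if d.getD a [] = [] then d.insert a [] else d)) d

def co_author_compute (entry : List (String × List String)) : List (String × List String) :=
  (entry.foldl (fun d p => pvAuthorsA d p.2) PySem.Dict.empty).items

-- ===== PORT B =====
-- one paper's contribution to the index: each distinct author of the paper gets
-- the paper appended to its bucket (papers_of.setdefault(a, []).append(au))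
def pvIndexPaper (d : PySem.Dict String (List (List String))) (au : List String) :
    PySem.Dict String (List (List String)) :=
  (PySem.List.dedup au).foldl (fun d a => d.modify a [] (fun l => l ++ [au])) d

-- list(dict.fromkeys(x for au in ps for x in au if x != a))
def pvRow (a : String) (ps : List (List String)) : List String :=
  PySem.List.dedup (ps.flatMap (fun au => au.filter (fun x => x ≠ a)))

def co_author_compute_alt (entry : List (String × List String)) : List (String × List String) :=
  (((entry.map (fun p => p.2)).foldl pvIndexPaper PySem.Dict.empty).items).map
    (fun q => (q.1, pvRow q.1 q.2))

-- ===== PRECONDITION & SPEC =====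
def Spec_co_author_compute (entry : List (String × List String)) (out : List (String × List String)) : Prop := out = co_author_compute_alt entry
instance (entry : List (String × List String)) (out : List (String × List String)) : Decidable (Spec_co_author_compute entry out) := by unfold Spec_co_author_compute; infer_instance

-- ===== CLAIM (what is proved, stated in full; the proofs are below) =====
def Claim_equal_co_author_compute : Prop := ∀ (entry : List (String × List String)), Dom_co_author_compute entry → Spec_co_author_compute entry (co_author_compute entry)

-- ===== LEMMAS AND PROOFS =====

-- the co-author occurrences A accumulates, as one flat list
def pvGatherRaw (papers : List (List String)) (a : String) : List String :=
  papers.flatMap (fun au => if a ∈ au then au.filter (fun x => x ≠ a) else [])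

-- A's per-element dedup-insert on the value level (skip self, skip present, else append)
def pvIns (a : String) (l : List String) (x : String) : List String :=
  if x = a then l else if x ∈ l then l else l ++ [x]

-- A's i-loop body as a named step over the paper's author list
def pvPaperStep (authors : List String) (d : PySem.Dict String (List String)) (a : String) :
    PySem.Dict String (List String) :=
  pvJA a authors (if d.getD a [] = [] then d.insert a [] else d)

theorem pvJA_eq (a : String) (authors : List String) (d : PySem.Dict String (List String)) :
    pvJA a authors d = authors.foldl (pvStepA a) d := by
  unfold pvJA
  exact PySem.List.foldl_pyRange_zero_pyGetD authors "" (pvStepA a) d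

theorem pvAuthorsA_eq (d : PySem.Dict String (List String)) (authors : List String) :
    pvAuthorsA d authors = authors.foldl (pvPaperStep authors) d := by
  unfold pvAuthorsA pvPaperStep
  exact PySem.List.foldl_pyRange_zero_pyGetD authors ""
    (fun d a => pvJA a authors (if d.getD a [] = [] then d.insert a [] else d)) d

theorem pvStepA_getD (a : String) (d : PySem.Dict String (List String)) (x k : String) :
    (pvStepA a d x).getD k [] =
      if k = a then pvIns a (d.getD a []) x else d.getD k [] := by
  by_cases hk : k = a
  · subst hk
    unfold pvStepA pvIns
    split_ifs with h1 h2 <;> simp_all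
  · unfold pvStepA pvIns
    split_ifs with h1 h2 <;> simp_all [PySem.Dict.getD_modify]

theorem pvJA_getD (a : String) (xs : List String) (d : PySem.Dict String (List String)) (k : String) :
    (xs.foldl (pvStepA a) d).getD k [] =
      if k = a then xs.foldl (pvIns a) (d.getD a []) else d.getD k [] := by
  induction xs generalizing d with
  | nil =>
    simp only [List.foldl_nil]
    split_ifs with h
    · rw [h]
    · rfl
  | cons x xs ih =>
    simp only [List.foldl_cons, ih, pvStepA_getD]
    split_ifs with h <;> simp

theorem pvStepA_keys (a : String) (d : PySem.Dict String (List String)) (x : String)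
    (hc : d.contains a = true) :
    (pvStepA a d x).keys = d.keys ∧ (pvStepA a d x).contains a = true := by
  unfold pvStepA
  split_ifs with h1 h2
  · exact ⟨rfl, hc⟩
  · exact ⟨rfl, hc⟩
  · constructor
    · rw [PySem.Dict.keys_modify, PySem.Dict.keys_insert_of_contains _ _ hc]
    · simp [PySem.Dict.contains_modify]

theorem pvJA_keys (a : String) (xs : List String) (d : PySem.Dict String (List String))
    (hc : d.contains a = true) :
    (xs.foldl (pvStepA a) d).keys = d.keys := by
  induction xs generalizing d with
  | nil => rfl
  | cons x xs ih =>
    obtain ⟨h1, h2⟩ := pvStepA_keys a d x hc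
    simp only [List.foldl_cons, ih _ h2, h1]

-- A's skip-self incremental dedup over xs = Set.add-fold of the ≠-a elements of xs
theorem pvIns_foldl_eq_add (a : String) (xs : List String) (s : PySem.Set String) :
    xs.foldl (pvIns a) s = (xs.filter (fun x => x ≠ a)).foldl PySem.Set.add s := by
  induction xs generalizing s with
  | nil => rfl
  | cons x xs ih =>
    by_cases hx : x = a
    · simp [hx, pvIns, ih]
    · have hadd : pvIns a s x = PySem.Set.add s x := by
        simp [pvIns, hx, PySem.Set.add]
      simp [hx, ih, hadd]

theorem pvDedup_append (l ys : List String) :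
    PySem.List.dedup (l ++ ys) = ys.foldl PySem.Set.add (PySem.List.dedup l) := by
  simp only [PySem.List.dedup, PySem.Set.ofList_append, PySem.Set.update]

theorem pvIns_foldl_dedup (a : String) (xs l : List String) :
    xs.foldl (pvIns a) (PySem.List.dedup l) =
      PySem.List.dedup (l ++ xs.filter (fun x => x ≠ a)) := by
  rw [pvIns_foldl_eq_add, pvDedup_append]

-- adding elements already present is a no-op
theorem pvFoldl_add_of_subset (f : List String) (s : PySem.Set String)
    (h : ∀ x ∈ f, x ∈ s) : f.foldl PySem.Set.add s = s := by
  induction f with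
  | nil => rfl
  | cons x xs ih =>
    have hx : PySem.Set.add s x = s := by
      simp [PySem.Set.add, h x (by simp)]
    simp only [List.foldl_cons, hx]
    exact ih (fun y hy => h y (by simp [hy]))

theorem pvDedup_idem (l f : List String) :
    PySem.List.dedup (l ++ f ++ f) = PySem.List.dedup (l ++ f) := by
  rw [pvDedup_append (l ++ f) f]
  exact pvFoldl_add_of_subset f _ (by
    intro x hx
    simp [PySem.List.dedup, PySem.Set.mem_ofList]
    tauto)

-- the setdefault-ish branch of A's i-loop changes no stored value
theorem pvSetdefaultish_getD (d : PySem.Dict String (List String)) (a k : String) :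
    (if d.getD a [] = [] then d.insert a [] else d).getD k [] = d.getD k [] := by
  split_ifs with h0
  · rw [PySem.Dict.getD_insert]
    split_ifs with h1
    · rw [h1, h0]
    · rfl
  · rfl

theorem pvPaperStep_getD (authors : List String) (d : PySem.Dict String (List String))
    (a k : String) (l : List String) (ha : d.getD a [] = PySem.List.dedup l) :
    (pvPaperStep authors d a).getD k [] =
      if k = a then PySem.List.dedup (l ++ authors.filter (fun x => x ≠ a))
      else d.getD k [] := by
  unfold pvPaperStep
  rw [pvJA_eq, pvJA_getD, pvSetdefaultish_getD, pvSetdefaultish_getD, ha, pvIns_foldl_dedup]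

-- values after A's whole i-loop over one paper
theorem pvInnerA_getD (authors xs : List String) (d : PySem.Dict String (List String))
    (v : String → List String) (hv : ∀ k, d.getD k [] = PySem.List.dedup (v k)) (k : String) :
    (xs.foldl (pvPaperStep authors) d).getD k [] =
      PySem.List.dedup
        (v k ++ if k ∈ xs then authors.filter (fun x => x ≠ k) else []) := by
  induction xs generalizing d v with
  | nil => simp [hv k]
  | cons x xs ih =>
    have hstep : ∀ j, (pvPaperStep authors d x).getD j [] =
        PySem.List.dedup
          ((fun j => if j = x then v x ++ authors.filter (fun t => t ≠ x) else v j) j) := by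
      intro j
      rw [pvPaperStep_getD authors d x j (v x) (hv x)]
      by_cases hj : j = x <;> simp [hj, hv j]
    simp only [List.foldl_cons]
    rw [ih _ _ hstep]
    by_cases hk : k = x
    · subst hk
      by_cases hm : k ∈ xs
      · rw [if_pos hm, if_pos (List.mem_cons_self), if_pos rfl, pvDedup_idem]
      · simp [hm]
    · simp [hk, List.mem_cons]

-- keys after A's i-loop body for one author
theorem pvPaperStep_keys (authors : List String) (d : PySem.Dict String (List String))
    (a : String) :
    (pvPaperStep authors d a).keys = PySem.Set.add d.keys a := by
  unfold pvPaperStep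
  have hsd : (if d.getD a [] = [] then d.insert a [] else d).keys = PySem.Set.add d.keys a ∧
      (if d.getD a [] = [] then d.insert a [] else d).contains a = true := by
    rcases Bool.eq_false_or_eq_true (d.contains a) with ht | hf
    · have hmem : a ∈ d.keys := by
        rw [PySem.Dict.contains_eq_decide_mem_keys] at ht; simpa using ht
      constructor
      · split_ifs with h0
        · rw [PySem.Dict.keys_insert_of_contains _ _ ht]
          simp [PySem.Set.add, PySem.Set.contains, hmem]
        · simp [PySem.Set.add, PySem.Set.contains, hmem]
      · split_ifs with h0
        · exact PySem.Dict.contains_insert_self d a []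
        · exact ht
    · have hmem : a ∉ d.keys := by
        rw [PySem.Dict.contains_eq_decide_mem_keys] at hf; simpa using hf
      rw [if_pos (PySem.Dict.getD_of_not_contains d [] hf)]
      constructor
      · rw [PySem.Dict.keys_insert_of_not_contains d [] hf]
        simp [PySem.Set.add, PySem.Set.contains, hmem]
      · exact PySem.Dict.contains_insert_self d a []
  rw [pvJA_eq, pvJA_keys a authors _ hsd.2, hsd.1]

theorem pvNodup_add (s : PySem.Set String) (x : String) (hn : s.Nodup) :
    (PySem.Set.add s x).Nodup := by
  by_cases h : x ∈ s
  · simpa [PySem.Set.add, PySem.Set.contains, h] using hn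
  · have : PySem.Set.add s x = s ++ [x] := by
      simp [PySem.Set.add, PySem.Set.contains, h]
    rw [this]
    exact hn.append (List.nodup_singleton x) (by simpa [List.disjoint_singleton] using h)

theorem pvInnerA_keys (authors xs : List String) (d : PySem.Dict String (List String))
    (hn : d.keys.Nodup) :
    (xs.foldl (pvPaperStep authors) d).keys = xs.foldl PySem.Set.add d.keys ∧
      (xs.foldl (pvPaperStep authors) d).keys.Nodup := by
  induction xs generalizing d with
  | nil => exact ⟨rfl, hn⟩
  | cons x xs ih =>
    have hk := pvPaperStep_keys authors d x
    have hn' : (pvPaperStep authors d x).keys.Nodup := by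
      rw [hk]; exact pvNodup_add d.keys x hn
    obtain ⟨h1, h2⟩ := ih _ hn'
    exact ⟨by simp only [List.foldl_cons, h1, hk], h2⟩

-- gather over one more paper
theorem pvGatherRaw_cons (au : List String) (ps : List (List String)) (k : String) :
    pvGatherRaw (au :: ps) k =
      (if k ∈ au then au.filter (fun x => x ≠ k) else []) ++ pvGatherRaw ps k := by
  simp [pvGatherRaw]

-- A's whole fold characterised: keys are the Set.add-fold, values the dedup'd gather
theorem pvA_inv (papers : List (List String)) (d : PySem.Dict String (List String))
    (v : String → List String) (hn : d.keys.Nodup)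
    (hv : ∀ k, d.getD k [] = PySem.List.dedup (v k)) :
    (papers.foldl pvAuthorsA d).keys =
        papers.foldl (fun s au => au.foldl PySem.Set.add s) d.keys ∧
      (papers.foldl pvAuthorsA d).keys.Nodup ∧
      ∀ k, (papers.foldl pvAuthorsA d).getD k [] =
        PySem.List.dedup (v k ++ pvGatherRaw papers k) := by
  induction papers generalizing d v with
  | nil =>
    refine ⟨rfl, hn, fun k => ?_⟩
    simp [pvGatherRaw, hv k]
  | cons au ps ih =>
    have hAeq : pvAuthorsA d au = au.foldl (pvPaperStep au) d := pvAuthorsA_eq d au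
    obtain ⟨hk1, hn1⟩ := pvInnerA_keys au au d hn
    have hv1 : ∀ k, (au.foldl (pvPaperStep au) d).getD k [] =
        PySem.List.dedup (v k ++ if k ∈ au then au.filter (fun x => x ≠ k) else []) :=
      fun k => pvInnerA_getD au au d v hv k
    obtain ⟨g1, g2, g3⟩ := ih (au.foldl (pvPaperStep au) d)
      (fun k => v k ++ if k ∈ au then au.filter (fun x => x ≠ k) else []) hn1 hv1
    refine ⟨?_, ?_, ?_⟩
    · simp only [List.foldl_cons, hAeq, g1, hk1]
    · simpa only [List.foldl_cons, hAeq] using g2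
    · intro k
      simp only [List.foldl_cons, hAeq, g3 k, pvGatherRaw_cons, List.append_assoc]

-- B-side: the key set of one modify / one indexed paper
theorem pvModify_keys (d : PySem.Dict String (List (List String))) (a : String)
    (f : List (List String) → List (List String)) :
    (d.modify a [] f).keys = PySem.Set.add d.keys a := by
  rw [PySem.Dict.keys_modify]
  rcases Bool.eq_false_or_eq_true (d.contains a) with ht | hf
  · have hmem : a ∈ d.keys := by
      rw [PySem.Dict.contains_eq_decide_mem_keys] at ht; simpa using ht
    rw [PySem.Dict.keys_insert_of_contains _ _ ht]
    simp [PySem.Set.add, PySem.Set.contains, hmem]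
  · have hmem : a ∉ d.keys := by
      rw [PySem.Dict.contains_eq_decide_mem_keys] at hf; simpa using hf
    rw [PySem.Dict.keys_insert_of_not_contains _ _ hf]
    simp [PySem.Set.add, PySem.Set.contains, hmem]

theorem pvFoldl_add_dedup (xs : List String) (s : PySem.Set String) :
    (PySem.List.dedup xs).foldl PySem.Set.add s = xs.foldl PySem.Set.add s := by
  have h1 : ∀ ys : List String, ys.foldl PySem.Set.add s = PySem.Set.update s ys := fun _ => rfl
  rw [h1, h1, PySem.Set.update_eq_append_filter, PySem.Set.update_eq_append_filter,
    PySem.List.dedup_eq_ofList, PySem.Set.ofList_ofList]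

theorem pvIndexPaper_keys (au : List String) (d : PySem.Dict String (List (List String))) :
    (pvIndexPaper d au).keys = au.foldl PySem.Set.add d.keys := by
  unfold pvIndexPaper
  rw [← pvFoldl_add_dedup]
  generalize PySem.List.dedup au = xs
  induction xs generalizing d with
  | nil => rfl
  | cons x xs ih => simp only [List.foldl_cons, ih, pvModify_keys]

theorem pvIndexPaper_getD (au : List String) (d : PySem.Dict String (List (List String)))
    (k : String) :
    (pvIndexPaper d au).getD k [] = d.getD k [] ++ if k ∈ au then [au] else [] := by
  unfold pvIndexPaper
  have key : ∀ (xs : List String) (d : PySem.Dict String (List (List String))), xs.Nodup →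
      (xs.foldl (fun d a => d.modify a [] (fun l => l ++ [au])) d).getD k [] =
        d.getD k [] ++ if k ∈ xs then [au] else [] := by
    intro xs
    induction xs with
    | nil => intro d _; simp
    | cons x xs ih =>
      intro d hn
      simp only [List.foldl_cons]
      rw [ih _ hn.of_cons, PySem.Dict.getD_modify]
      by_cases hk : k = x
      · subst hk
        have hkxs : k ∉ xs := (List.nodup_cons.mp hn).1
        simp [hkxs]
      · simp [hk, List.mem_cons]
  rw [key (PySem.List.dedup au) d (PySem.List.nodup_dedup au)]
  simp

-- B's index fold characterised: same key order as A, buckets = papers containing the key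
theorem pvIdx_inv (papers : List (List String)) (d : PySem.Dict String (List (List String))) :
    (papers.foldl pvIndexPaper d).keys =
        papers.foldl (fun s au => au.foldl PySem.Set.add s) d.keys ∧
      ∀ k, (papers.foldl pvIndexPaper d).getD k [] =
        d.getD k [] ++ papers.filter (fun au => decide (k ∈ au)) := by
  induction papers generalizing d with
  | nil => exact ⟨rfl, fun k => by simp⟩
  | cons au ps ih =>
    obtain ⟨h1, h2⟩ := ih (pvIndexPaper d au)
    refine ⟨?_, fun k => ?_⟩
    · simp only [List.foldl_cons, h1, pvIndexPaper_keys]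
    · simp only [List.foldl_cons, h2 k, pvIndexPaper_getD, List.filter_cons]
      by_cases hm : k ∈ au <;> simp [hm]

-- A's gather = flat co-author occurrences of the papers containing the author
theorem pvGatherRaw_eq_filter (papers : List (List String)) (k : String) :
    pvGatherRaw papers k =
      (papers.filter (fun au => decide (k ∈ au))).flatMap
        (fun au => au.filter (fun x => x ≠ k)) := by
  induction papers with
  | nil => rfl
  | cons au ps ih =>
    rw [pvGatherRaw_cons, ih, List.filter_cons]
    by_cases hm : k ∈ au
    · rw [if_pos hm, if_pos (by simpa using hm), List.flatMap_cons]
    · rw [if_neg hm, if_neg (by simpa using hm), List.nil_append]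

-- ===== VERDICT (by name: the statement is the Claim_ definition above) =====
theorem co_author_compute_spec : Claim_equal_co_author_compute := by
  intro entry _
  unfold Spec_co_author_compute co_author_compute co_author_compute_alt
  have hfold : entry.foldl (fun d p => pvAuthorsA d p.2) PySem.Dict.empty =
      (entry.map (fun p => p.2)).foldl pvAuthorsA PySem.Dict.empty := by
    rw [List.foldl_map]
  set papers := entry.map (fun p => p.2) with hp
  obtain ⟨hk, hn, hv⟩ := pvA_inv papers PySem.Dict.empty (fun _ => [])
    (by simp [PySem.Dict.keys_empty]) (fun k => by simp [PySem.Dict.getD_empty])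
  obtain ⟨bk, bv⟩ := pvIdx_inv papers PySem.Dict.empty
  have hkeq : (papers.foldl pvIndexPaper PySem.Dict.empty).keys =
      (papers.foldl pvAuthorsA PySem.Dict.empty).keys := bk.trans hk.symm
  have hnB : (papers.foldl pvIndexPaper PySem.Dict.empty).keys.Nodup := by
    rw [hkeq]; exact hn
  rw [hfold, PySem.Dict.items_eq_map_keys _ hn [],
    PySem.Dict.items_eq_map_keys _ hnB [], hkeq, List.map_map]
  refine List.map_congr_left (fun k _ => ?_)
  simp only [Function.comp]
  rw [hv k, bv k, pvRow, pvGatherRaw_eq_filter]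
  simp [PySem.Dict.getD_empty]
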